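-- pv_equiv track=rewrite | github.com/katuneko/icfpc2006 | physics_macro_search.py | step_concrete
-- ===== SOURCE A (Python) =====
-- from typing import Dict, List, Optional, Sequence, Set, Tuple
--
-- ConcreteState = Tuple[int, int, int, int, int, int]
--
-- def step_concrete(state: ConcreteState, imm: int) -> ConcreteState:
--     sr0, sr1, sr2, sr3, dr0, dr1 = state
--     sr0 = (sr0 + imm) & 0xFF
--     regs = [sr0, sr1, sr2, sr3, dr0, dr1]
--     mask = imm & 0x1F
--     order = [5, 4, 3, 2, 1]
--     c = [idx for bit, idx in enumerate(order) if (mask >> bit) & 1]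
--     if c:
--         seq = [0] + c
--         old = [regs[i] for i in seq]
--         for dest, val in zip(seq[1:], old[:-1]):
--             regs[dest] = val
--         regs[0] = old[-1]
--     return tuple(regs)  # type: ignore[return-value]
-- ===== SOURCE B (Python) =====
-- # step_concrete via a precomputed 32-entry dispatch table: imm's low 5 bits index
-- # a fixed source-index row, and the result is a single gather -- no runtime decode
-- # of the bit pattern and no cyclic shifting.
-- _ROT = (
--     (0, 1, 2, 3, 4, 5),
--     (5, 1, 2, 3, 4, 0),
--     (4, 1, 2, 3, 0, 5),
--     (4, 1, 2, 3, 5, 0),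
--     (3, 1, 2, 0, 4, 5),
--     (3, 1, 2, 5, 4, 0),
--     (3, 1, 2, 4, 0, 5),
--     (3, 1, 2, 4, 5, 0),
--     (2, 1, 0, 3, 4, 5),
--     (2, 1, 5, 3, 4, 0),
--     (2, 1, 4, 3, 0, 5),
--     (2, 1, 4, 3, 5, 0),
--     (2, 1, 3, 0, 4, 5),
--     (2, 1, 3, 5, 4, 0),
--     (2, 1, 3, 4, 0, 5),
--     (2, 1, 3, 4, 5, 0),
--     (1, 0, 2, 3, 4, 5),
--     (1, 5, 2, 3, 4, 0),
--     (1, 4, 2, 3, 0, 5),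
--     (1, 4, 2, 3, 5, 0),
--     (1, 3, 2, 0, 4, 5),
--     (1, 3, 2, 5, 4, 0),
--     (1, 3, 2, 4, 0, 5),
--     (1, 3, 2, 4, 5, 0),
--     (1, 2, 0, 3, 4, 5),
--     (1, 2, 5, 3, 4, 0),
--     (1, 2, 4, 3, 0, 5),
--     (1, 2, 4, 3, 5, 0),
--     (1, 2, 3, 0, 4, 5),
--     (1, 2, 3, 5, 4, 0),
--     (1, 2, 3, 4, 0, 5),
--     (1, 2, 3, 4, 5, 0),
-- )
--
-- def step_concrete(state, imm):
--     regs = ((state[0] + imm) & 0xFF,) + tuple(state[1:])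
--     return tuple(regs[j] for j in _ROT[imm & 0x1F])
-- ===== Notes on version B (the rewrite author's own statement) =====
-- stated objective: alternative
-- what changed: A decodes imm's 5 mask bits into a cycle of register indices at every call and applies it by an in-place shift loop over the register list; B carries a precomputed 32-entry dispatch table mapping imm & 0x1F directly to a source-index row and returns the registers in one pure gather pass, with no runtime bit decoding, no cycle construction and no mutation.
import Mathlib
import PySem

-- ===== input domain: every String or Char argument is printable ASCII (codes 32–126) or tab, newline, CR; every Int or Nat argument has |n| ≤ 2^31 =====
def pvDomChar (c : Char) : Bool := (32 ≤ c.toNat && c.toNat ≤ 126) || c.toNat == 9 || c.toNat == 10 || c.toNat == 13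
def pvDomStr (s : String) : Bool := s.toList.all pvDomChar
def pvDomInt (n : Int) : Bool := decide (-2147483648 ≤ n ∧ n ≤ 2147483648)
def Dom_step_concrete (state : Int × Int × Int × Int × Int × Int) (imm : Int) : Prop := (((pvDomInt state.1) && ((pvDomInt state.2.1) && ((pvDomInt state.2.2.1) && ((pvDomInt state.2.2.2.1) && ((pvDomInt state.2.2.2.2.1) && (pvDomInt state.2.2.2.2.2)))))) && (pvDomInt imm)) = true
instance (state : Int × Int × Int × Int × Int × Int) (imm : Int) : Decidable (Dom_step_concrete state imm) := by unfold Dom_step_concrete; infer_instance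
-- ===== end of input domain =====

-- B replaces A's runtime bit-decode + in-place cyclic shift by a precomputed 32-entry
-- dispatch table of source indices and a single gather (objective: alternative).

-- ===== PORT A =====
-- literal transliteration of A: decode the low 5 bits of imm into the cycle c,
-- then rotate the register list in place along seq = 0 :: c.
-- (seq[1:] / old[:-1] are ported as .tail / .dropLast, exact for these list shapes;
--  old[-1] as .getLastD 0, exact since old is nonempty here.)
def step_concrete (state : Int × Int × Int × Int × Int × Int) (imm : Int) : Int × Int × Int × Int × Int × Int :=
  let (sr0, sr1, sr2, sr3, dr0, dr1) := state
  let sr0 := PySem.Int.band (sr0 + imm) 0xFF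
  let regs := [sr0, sr1, sr2, sr3, dr0, dr1]
  let mask := PySem.Int.band imm 0x1F
  let order : List Nat := [5, 4, 3, 2, 1]
  let c := (PySem.List.enumerate order).filterMap
      (fun bi => if PySem.Int.band (mask >>> bi.1.toNat) 1 = 1 then some bi.2 else none)
  let regs :=
    if c ≠ [] then
      let seq := 0 :: c
      let old := seq.map (fun i => regs.getD i 0)
      let regs := (List.zip seq.tail old.dropLast).foldl (fun rs dv => rs.set dv.1 dv.2) regs
      regs.set 0 (old.getLastD 0)
    else regs
  (regs.getD 0 0, regs.getD 1 0, regs.getD 2 0, regs.getD 3 0, regs.getD 4 0, regs.getD 5 0)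

-- ===== PORT B =====
-- transliteration of B (Source B): the fixed table _ROT, indexed by imm & 0x1F, gives for each
-- output register the index of its source register; the result is one gather pass.
-- (imm & 0x1F is nonnegative, so .toNat is exact as the Python list index.)
def pvRotTable : List (List Nat) := [
  [0, 1, 2, 3, 4, 5],
  [5, 1, 2, 3, 4, 0],
  [4, 1, 2, 3, 0, 5],
  [4, 1, 2, 3, 5, 0],
  [3, 1, 2, 0, 4, 5],
  [3, 1, 2, 5, 4, 0],
  [3, 1, 2, 4, 0, 5],
  [3, 1, 2, 4, 5, 0],
  [2, 1, 0, 3, 4, 5],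
  [2, 1, 5, 3, 4, 0],
  [2, 1, 4, 3, 0, 5],
  [2, 1, 4, 3, 5, 0],
  [2, 1, 3, 0, 4, 5],
  [2, 1, 3, 5, 4, 0],
  [2, 1, 3, 4, 0, 5],
  [2, 1, 3, 4, 5, 0],
  [1, 0, 2, 3, 4, 5],
  [1, 5, 2, 3, 4, 0],
  [1, 4, 2, 3, 0, 5],
  [1, 4, 2, 3, 5, 0],
  [1, 3, 2, 0, 4, 5],
  [1, 3, 2, 5, 4, 0],
  [1, 3, 2, 4, 0, 5],
  [1, 3, 2, 4, 5, 0],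
  [1, 2, 0, 3, 4, 5],
  [1, 2, 5, 3, 4, 0],
  [1, 2, 4, 3, 0, 5],
  [1, 2, 4, 3, 5, 0],
  [1, 2, 3, 0, 4, 5],
  [1, 2, 3, 5, 4, 0],
  [1, 2, 3, 4, 0, 5],
  [1, 2, 3, 4, 5, 0]]

def step_concrete_alt (state : Int × Int × Int × Int × Int × Int) (imm : Int) : Int × Int × Int × Int × Int × Int :=
  let (s0, s1, s2, s3, s4, s5) := state
  let regs := [PySem.Int.band (s0 + imm) 0xFF, s1, s2, s3, s4, s5]
  let row := pvRotTable.getD (PySem.Int.band imm 0x1F).toNat []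
  match row.map (fun j => regs.getD j 0) with
  | [a, b, c, d, e, f] => (a, b, c, d, e, f)
  | _ => (0, 0, 0, 0, 0, 0)

-- ===== PRECONDITION & SPEC =====
def Spec_step_concrete (state : Int × Int × Int × Int × Int × Int) (imm : Int) (out : Int × Int × Int × Int × Int × Int) : Prop := out = step_concrete_alt state imm
instance (state : Int × Int × Int × Int × Int × Int) (imm : Int) (out : Int × Int × Int × Int × Int × Int) : Decidable (Spec_step_concrete state imm out) := by unfold Spec_step_concrete; infer_instance

-- ===== CLAIM (what is proved, stated in full; the proofs are below) =====
def Claim_equal_step_concrete : Prop := ∀ (state : Int × Int × Int × Int × Int × Int) (imm : Int), Dom_step_concrete state imm → Spec_step_concrete state imm (step_concrete state imm)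

-- ===== LEMMAS AND PROOFS =====

-- `imm & 31` is `imm % 32` (Euclidean remainder by a positive power of two).
theorem pv_band31_eq_emod (a : Int) : PySem.Int.band a 31 = a % 32 := by
  unfold PySem.Int.band
  have e : (31 : Int).toNat = 31 := rfl
  have k1 : ∀ n : Nat, n &&& 31 = n % 32 := fun n => by
    have := Nat.and_two_pow_sub_one_eq_mod n 5; norm_num at this; exact this
  split_ifs with h h2 h2
  · rw [e, k1]; omega
  · norm_num at h2
  · rw [e, Nat.land_comm, k1]; omega
  · norm_num at h2

-- ===== VERDICT (by name: the statement is the Claim_ definition above) =====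
-- Both ports depend on imm only through the shared masked sr0 value and imm % 32;
-- generalizing those two and running interval_cases on the 32 residues leaves closed
-- list computations over the six free register values on both sides, each closed by rfl.
set_option maxHeartbeats 2000000 in
theorem step_concrete_spec : Claim_equal_step_concrete := by
  intro state imm _
  obtain ⟨s0, s1, s2, s3, s4, s5⟩ := state
  unfold Spec_step_concrete step_concrete step_concrete_alt
  rw [show (0x1F : Int) = 31 from rfl, pv_band31_eq_emod]
  have h0 : 0 ≤ imm % 32 := Int.emod_nonneg _ (by norm_num)
  have h1 : imm % 32 < 32 := Int.emod_lt_of_pos _ (by norm_num)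
  generalize PySem.Int.band (s0 + imm) 0xFF = t
  generalize hr : imm % 32 = r at h0 h1 ⊢
  interval_cases r <;> rfl
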